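-- pv_equiv track=rewrite | github.com/unidel2035/judas-priest-hives | pac/pac_decompiler_refined.py | patternreplace
-- ===== SOURCE A (Python) =====
-- def patternreplace(s: str, lzpmask: bool = False) -> str:
--     """
--     Implements JavaScript patternreplace function
--
--     CRITICAL: JavaScript code does s.split(patterns[pattern]).join(pattern)
--     This means it replaces the VALUE with the KEY (reverse direction!)
--
--     This function is ONLY used for encoding the mask (lzpmask=True).
--     For domain decompression, use patternexpand() instead.
--     """
--     if lzpmask:
--         # Patterns for LZP mask decoding
--         # Format: 'KEY': 'VALUE' but we replace VALUE -> KEY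
--         patterns = {
--             'AA': '!', 'gA': '@', 'AB': '#', 'AQ': '$',
--             'AE': '%', 'AC': '^', 'AI': '*', 'Ag': '(',
--             'AD': ')', 'Aw': '[', 'AM': ']', 'Bg': '-',
--             'CA': ',', 'IA': '.', 'BA': '?'
--         }
--     else:
--         # Patterns for domain data (encoding direction: VALUE -> KEY)
--         patterns = {}
--
--     result = s
--     # Replace VALUE with KEY (reversed from typical replacement)
--     for pattern_key, pattern_value in patterns.items():
--         result = result.replace(pattern_value, pattern_key)
--
--     return result
-- ===== SOURCE B (Python) =====
-- # B: one precomputed char->key mapping and a single join over the string,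
-- # with an early return when lzpmask is False.
-- _MASK_TABLE = {
--     '!': 'AA', '@': 'gA', '#': 'AB', '$': 'AQ',
--     '%': 'AE', '^': 'AC', '*': 'AI', '(': 'Ag',
--     ')': 'AD', '[': 'Aw', ']': 'AM', '-': 'Bg',
--     ',': 'CA', '.': 'IA', '?': 'BA'
-- }
--
-- def patternreplace(s: str, lzpmask: bool = False) -> str:
--     if not lzpmask:
--         return s
--     # Every replaced source is a single character and no inserted key character
--     # is itself replaced, so one lookup pass equals A's 15 sequential replaces.
--     return ''.join(_MASK_TABLE.get(ch, ch) for ch in s)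
-- ===== Notes on version B (the rewrite author's own statement) =====
-- stated objective: idiomatic
-- what changed: Inverts the dict once into a char-keyed table and builds the result in a single join pass over the characters (with an early return of s when lzpmask is False), instead of 15 sequential str.replace scans of the whole string.
import Mathlib
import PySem

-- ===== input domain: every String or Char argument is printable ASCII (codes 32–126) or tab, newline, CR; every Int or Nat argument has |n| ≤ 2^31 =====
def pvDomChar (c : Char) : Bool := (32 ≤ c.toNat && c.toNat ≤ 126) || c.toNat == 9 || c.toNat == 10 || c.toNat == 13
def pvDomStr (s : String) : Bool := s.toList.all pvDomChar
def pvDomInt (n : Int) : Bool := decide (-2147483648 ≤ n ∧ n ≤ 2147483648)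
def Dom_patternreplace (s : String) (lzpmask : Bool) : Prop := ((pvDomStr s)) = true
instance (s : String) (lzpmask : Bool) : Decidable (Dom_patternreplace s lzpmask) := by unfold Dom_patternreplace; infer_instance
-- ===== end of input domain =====

-- B replaces A's 15 sequential str.replace scans by one char-keyed lookup table and a
-- single join pass over the characters, returning s early when lzpmask is False (idiomatic).


-- ===== PORT A =====
-- The LZP-mask pattern dict as an association list in insertion order (KEY, VALUE).
def pvPatternsA : List (String × String) :=
  [("AA", "!"), ("gA", "@"), ("AB", "#"), ("AQ", "$"),
   ("AE", "%"), ("AC", "^"), ("AI", "*"), ("Ag", "("),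
   ("AD", ")"), ("Aw", "["), ("AM", "]"), ("Bg", "-"),
   ("CA", ","), ("IA", "."), ("BA", "?")]

-- for pattern_key, pattern_value in patterns.items(): result = result.replace(pattern_value, pattern_key)
def patternreplace (s : String) (lzpmask : Bool) : String :=
  let patterns : List (String × String) := if lzpmask then pvPatternsA else []
  patterns.foldl (fun result kv => PySem.Str.replace result kv.2 kv.1) s

-- ===== PORT B =====
-- _MASK_TABLE = {'!': 'AA', …}: the module-level char-keyed dict of Source B.
def pvMaskTable : PySem.Dict Char String :=
  PySem.Dict.mk
    [('!', "AA"), ('@', "gA"), ('#', "AB"), ('$', "AQ"),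
     ('%', "AE"), ('^', "AC"), ('*', "AI"), ('(', "Ag"),
     (')', "AD"), ('[', "Aw"), (']', "AM"), ('-', "Bg"),
     (',', "CA"), ('.', "IA"), ('?', "BA")]

-- if not lzpmask: return s;  ''.join(_MASK_TABLE.get(ch, ch) for ch in s)
def patternreplace_alt (s : String) (lzpmask : Bool) : String :=
  if lzpmask = false then s
  else PySem.Str.join "" (s.toList.map (fun ch => pvMaskTable.getD ch (String.ofList [ch])))

-- ===== PRECONDITION & SPEC =====
def Spec_patternreplace (s : String) (lzpmask : Bool) (out : String) : Prop := out = patternreplace_alt s lzpmask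
instance (s : String) (lzpmask : Bool) (out : String) : Decidable (Spec_patternreplace s lzpmask out) := by unfold Spec_patternreplace; infer_instance

-- ===== CLAIM (what is proved, stated in full; the proofs are below) =====
def Claim_equal_patternreplace : Prop := ∀ (s : String) (lzpmask : Bool), Dom_patternreplace s lzpmask → Spec_patternreplace s lzpmask (patternreplace s lzpmask)

-- ===== LEMMAS AND PROOFS =====

-- the per-character substitution both programs implement
def pvTr (c : Char) : List Char :=
  if c = '!' then ['A','A'] else if c = '@' then ['g','A'] else if c = '#' then ['A','B']
  else if c = '$' then ['A','Q'] else if c = '%' then ['A','E'] else if c = '^' then ['A','C']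
  else if c = '*' then ['A','I'] else if c = '(' then ['A','g'] else if c = ')' then ['A','D']
  else if c = '[' then ['A','w'] else if c = ']' then ['A','M'] else if c = '-' then ['B','g']
  else if c = ',' then ['C','A'] else if c = '.' then ['I','A'] else if c = '?' then ['B','A']
  else [c]

-- replace with a single-character needle is a per-character flatMap
lemma pv_go_single (c : Char) (new : List Char) :
    ∀ (l : List Char) (fuel : Nat) (acc : List Char), l.length ≤ fuel →
      PySem.Chars.replace.go [c] new fuel l acc
        = acc.reverse ++ l.flatMap (fun x => if x = c then new else [x]) := by
  intro l
  induction l with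
  | nil =>
      intro fuel acc _
      cases fuel <;> simp [PySem.Chars.replace.go]
  | cons x t ih =>
      intro fuel acc hlen
      cases fuel with
      | zero => simp at hlen
      | succ f =>
          have ht : t.length ≤ f := by simpa using hlen
          by_cases hx : x = c
          · subst hx
            simp [PySem.Chars.replace.go, List.isPrefixOf, ih f _ ht]
          · have : ([c].isPrefixOf (x :: t)) = false := by
              simp [List.isPrefixOf]
              exact fun h => (hx h.symm).elim
            simp [PySem.Chars.replace.go, this, hx, ih f _ ht]

lemma pv_replace_single (s : List Char) (c : Char) (new : List Char) :
    PySem.Chars.replace s [c] new = s.flatMap (fun x => if x = c then new else [x]) := by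
  simp [PySem.Chars.replace, pv_go_single c new s s.length [] (le_refl _)]

-- A's fifteen single-character replaces, composed, act per character as pvTr
lemma pv_A_toList (s : String) :
    (patternreplace s true).toList = s.toList.flatMap pvTr := by
  show (pvPatternsA.foldl (fun result kv => PySem.Str.replace result kv.2 kv.1) s).toList
      = s.toList.flatMap pvTr
  have step : ∀ (t : String) (old new : String),
      (PySem.Str.replace t old new).toList = PySem.Chars.replace t.toList old.toList new.toList := by
    intro t old new; simp
  simp only [pvPatternsA, List.foldl, step,
    (show ("AA" : String).toList = ['A','A'] from rfl),
    (show ("!" : String).toList = ['!'] from rfl),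
    (show ("gA" : String).toList = ['g','A'] from rfl),
    (show ("@" : String).toList = ['@'] from rfl),
    (show ("AB" : String).toList = ['A','B'] from rfl),
    (show ("#" : String).toList = ['#'] from rfl),
    (show ("AQ" : String).toList = ['A','Q'] from rfl),
    (show ("$" : String).toList = ['$'] from rfl),
    (show ("AE" : String).toList = ['A','E'] from rfl),
    (show ("%" : String).toList = ['%'] from rfl),
    (show ("AC" : String).toList = ['A','C'] from rfl),
    (show ("^" : String).toList = ['^'] from rfl),
    (show ("AI" : String).toList = ['A','I'] from rfl),
    (show ("*" : String).toList = ['*'] from rfl),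
    (show ("Ag" : String).toList = ['A','g'] from rfl),
    (show ("(" : String).toList = ['('] from rfl),
    (show ("AD" : String).toList = ['A','D'] from rfl),
    (show (")" : String).toList = [')'] from rfl),
    (show ("Aw" : String).toList = ['A','w'] from rfl),
    (show ("[" : String).toList = ['['] from rfl),
    (show ("AM" : String).toList = ['A','M'] from rfl),
    (show ("]" : String).toList = [']'] from rfl),
    (show ("Bg" : String).toList = ['B','g'] from rfl),
    (show ("-" : String).toList = ['-'] from rfl),
    (show ("CA" : String).toList = ['C','A'] from rfl),
    (show ("," : String).toList = [','] from rfl),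
    (show ("IA" : String).toList = ['I','A'] from rfl),
    (show ("." : String).toList = ['.'] from rfl),
    (show ("BA" : String).toList = ['B','A'] from rfl),
    (show ("?" : String).toList = ['?'] from rfl),
    pv_replace_single]
  induction s.toList with
  | nil => simp
  | cons x t ih =>
      by_cases h1 : x = '!'
      · subst h1; simp [ih, pvTr]
      by_cases h2 : x = '@'
      · subst h2; simp [ih, pvTr]
      by_cases h3 : x = '#'
      · subst h3; simp [ih, pvTr]
      by_cases h4 : x = '$'
      · subst h4; simp [ih, pvTr]
      by_cases h5 : x = '%'
      · subst h5; simp [ih, pvTr]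
      by_cases h6 : x = '^'
      · subst h6; simp [ih, pvTr]
      by_cases h7 : x = '*'
      · subst h7; simp [ih, pvTr]
      by_cases h8 : x = '('
      · subst h8; simp [ih, pvTr]
      by_cases h9 : x = ')'
      · subst h9; simp [ih, pvTr]
      by_cases h10 : x = '['
      · subst h10; simp [ih, pvTr]
      by_cases h11 : x = ']'
      · subst h11; simp [ih, pvTr]
      by_cases h12 : x = '-'
      · subst h12; simp [ih, pvTr]
      by_cases h13 : x = ','
      · subst h13; simp [ih, pvTr]
      by_cases h14 : x = '.'
      · subst h14; simp [ih, pvTr]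
      by_cases h15 : x = '?'
      · subst h15; simp [ih, pvTr]
      simp [ih, pvTr, h1, h2, h3, h4, h5, h6, h7, h8, h9, h10, h11, h12, h13, h14, h15]

-- B's table lookup acts per character as pvTr
lemma pv_B_char (ch : Char) :
    (pvMaskTable.getD ch (String.ofList [ch])).toList = pvTr ch := by
      by_cases h1 : ch = '!'
      · subst h1; rfl
      by_cases h2 : ch = '@'
      · subst h2; rfl
      by_cases h3 : ch = '#'
      · subst h3; rfl
      by_cases h4 : ch = '$'
      · subst h4; rfl
      by_cases h5 : ch = '%'
      · subst h5; rfl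
      by_cases h6 : ch = '^'
      · subst h6; rfl
      by_cases h7 : ch = '*'
      · subst h7; rfl
      by_cases h8 : ch = '('
      · subst h8; rfl
      by_cases h9 : ch = ')'
      · subst h9; rfl
      by_cases h10 : ch = '['
      · subst h10; rfl
      by_cases h11 : ch = ']'
      · subst h11; rfl
      by_cases h12 : ch = '-'
      · subst h12; rfl
      by_cases h13 : ch = ','
      · subst h13; rfl
      by_cases h14 : ch = '.'
      · subst h14; rfl
      by_cases h15 : ch = '?'
      · subst h15; rfl
      simp [pvMaskTable, PySem.Dict.getD, PySem.Dict.get?, pvTr,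
        h1, h2, h3, h4, h5, h6, h7, h8, h9, h10, h11, h12, h13, h14, h15,
        Ne.symm h1, Ne.symm h2, Ne.symm h3, Ne.symm h4, Ne.symm h5, Ne.symm h6, Ne.symm h7,
        Ne.symm h8, Ne.symm h9, Ne.symm h10, Ne.symm h11, Ne.symm h12, Ne.symm h13,
        Ne.symm h14, Ne.symm h15]

-- join with the empty separator is concatenation
lemma pv_join_nil (xss : List (List Char)) : PySem.Chars.join [] xss = xss.flatten := by
  simp [PySem.Chars.join, List.intercalate]
  induction xss with
  | nil => simp
  | cons h t ih => cases t <;> simp_all [List.intersperse]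

lemma pv_B_toList (s : String) :
    (patternreplace_alt s true).toList = s.toList.flatMap pvTr := by
  show (PySem.Str.join "" (s.toList.map
      (fun ch => pvMaskTable.getD ch (String.ofList [ch])))).toList
      = s.toList.flatMap pvTr
  rw [PySem.Str.toList_join]
  show PySem.Chars.join [] _ = _
  rw [pv_join_nil, List.map_map]
  simp only [Function.comp_def, pv_B_char]
  simp [List.flatMap]

-- ===== VERDICT (by name: the statement is the Claim_ definition above) =====
theorem patternreplace_spec : Claim_equal_patternreplace := by
  intro s lzpmask _
  show patternreplace s lzpmask = patternreplace_alt s lzpmask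
  cases lzpmask with
  | false => rfl
  | true =>
      apply String.toList_inj.mp
      rw [pv_A_toList, pv_B_toList]
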